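-- pv_equiv track=rewrite | github.com/pypi-data/pypi-mirror-358 | packages/omegaid/omegaid-0.2.4-py3-none-any.whl/omegaid/core/doublet_lattice.py | generate_doublet_mi_tasks
-- ===== SOURCE A (Python) =====
-- from itertools import product, chain, combinations
-- from typing import List, Tuple
--
-- def generate_doublet_mi_tasks(
--     n_sources: int, n_targets: int
-- ) -> List[Tuple[List[int], List[int]]]:
--     source_indices = list(range(n_sources))
--     target_indices = list(range(n_sources, n_sources + n_targets))
--
--     all_source_subsets = [
--         list(s) for s in chain.from_iterable(
--             combinations(source_indices, r) for r in range(len(source_indices) + 1)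
--         )
--     ]
--     all_target_subsets = [
--         list(s) for s in chain.from_iterable(
--             combinations(target_indices, r) for r in range(len(target_indices) + 1)
--         )
--     ]
--
--     mi_tasks = list(product(all_source_subsets, all_target_subsets))
--
--     return mi_tasks
-- ===== SOURCE B (Python) =====
-- def _power_set(indices):
--     n = len(indices)
--     subsets = []
--     for mask in range(2 ** n):
--         subsets.append([indices[i] for i in range(n) if (mask >> i) & 1])
--     return sorted(subsets, key=lambda s: (len(s), s))
--
--
-- def generate_doublet_mi_tasks(n_sources, n_targets):
--     src_subsets = _power_set(list(range(n_sources)))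
--     tgt_subsets = _power_set(list(range(n_sources, n_sources + n_targets)))
--     tasks = []
--     for s in src_subsets:
--         for t in tgt_subsets:
--             tasks.append((s, t))
--     return tasks
-- ===== Notes on version B (the rewrite author's own statement) =====
-- stated objective: alternative
-- what changed: B builds each power set by bitmask enumeration (masks 0..2^n-1) followed by one sort on the key (len, subset) instead of itertools.combinations size by size, and forms the Cartesian product with an explicit nested accumulation loop instead of itertools.product.
import Mathlib
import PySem

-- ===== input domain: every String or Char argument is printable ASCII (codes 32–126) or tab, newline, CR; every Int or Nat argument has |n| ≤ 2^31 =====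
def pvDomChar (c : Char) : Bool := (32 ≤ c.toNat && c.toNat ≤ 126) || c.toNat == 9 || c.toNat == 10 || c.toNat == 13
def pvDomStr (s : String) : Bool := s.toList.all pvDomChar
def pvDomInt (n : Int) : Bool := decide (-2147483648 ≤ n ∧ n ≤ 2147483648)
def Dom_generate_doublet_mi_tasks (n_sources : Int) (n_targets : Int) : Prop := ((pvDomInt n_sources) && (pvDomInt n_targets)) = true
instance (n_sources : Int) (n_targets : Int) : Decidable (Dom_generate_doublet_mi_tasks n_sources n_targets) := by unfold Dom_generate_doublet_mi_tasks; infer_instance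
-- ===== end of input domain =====

-- B replaces the size-by-size itertools enumeration with bitmask power-set generation plus one
-- sort, and itertools.product with an explicit nested accumulation loop (alternative, not faster).

-- ===== PORT A =====
-- chain.from_iterable(combinations(l, r) for r in range(len(l)+1)) → flatMap over List.range
-- (the r's are the nonnegative counts 0..len(l), so Nat List.range is exact);
-- 'list(s)' is the identity on the already-list combinations; itertools.product → flatMap/map.
def generate_doublet_mi_tasks (n_sources : Int) (n_targets : Int) : List (List Int × List Int) :=
  let source_indices := PySem.List.pyRange 0 n_sources 1
  let target_indices := PySem.List.pyRange n_sources (n_sources + n_targets) 1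
  let all_source_subsets :=
    (List.range (source_indices.length + 1)).flatMap (fun r => PySem.List.combinations source_indices r)
  let all_target_subsets :=
    (List.range (target_indices.length + 1)).flatMap (fun r => PySem.List.combinations target_indices r)
  all_source_subsets.flatMap (fun s => all_target_subsets.map (fun t => (s, t)))

-- ===== PORT B =====
-- [indices[i] for i in range(n) if (mask >> i) & 1] — mask and i come from Python ranges of
-- nonnegative ints, so Nat List.range is exact; indices[i] with 0 ≤ i < len is getD (exact here).
def pvMaskSubset (indices : List Int) (mask : Nat) : List Int :=
  ((List.range indices.length).filter (fun i => (mask >>> i) &&& 1 == 1)).map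
    (fun i => indices.getD i 0)

-- sorted(subsets, key=lambda s: (len(s), s)) → PySem.List.sorted2 with the two key components
def pvPowerSet (indices : List Int) : List (List Int) :=
  PySem.List.sorted2
    ((List.range (2 ^ indices.length)).map (fun mask => pvMaskSubset indices mask))
    (fun s => (s.length : Int)) (fun s => s) false

def generate_doublet_mi_tasks_alt (n_sources : Int) (n_targets : Int) : List (List Int × List Int) :=
  let src_subsets := pvPowerSet (PySem.List.pyRange 0 n_sources 1)
  let tgt_subsets := pvPowerSet (PySem.List.pyRange n_sources (n_sources + n_targets) 1)
  src_subsets.foldl (fun tasks s => tgt_subsets.foldl (fun tasks t => tasks ++ [(s, t)]) tasks) []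

-- ===== PRECONDITION & SPEC =====
def Spec_generate_doublet_mi_tasks (n_sources : Int) (n_targets : Int) (out : List (List Int × List Int)) : Prop := out = generate_doublet_mi_tasks_alt n_sources n_targets
instance (n_sources : Int) (n_targets : Int) (out : List (List Int × List Int)) : Decidable (Spec_generate_doublet_mi_tasks n_sources n_targets out) := by unfold Spec_generate_doublet_mi_tasks; infer_instance

-- ===== CLAIM (what is proved, stated in full; the proofs are below) =====
def Claim_equal_generate_doublet_mi_tasks : Prop := ∀ (n_sources : Int) (n_targets : Int), Dom_generate_doublet_mi_tasks n_sources n_targets → Spec_generate_doublet_mi_tasks n_sources n_targets (generate_doublet_mi_tasks n_sources n_targets)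

-- ===== LEMMAS AND PROOFS =====

-- A's power set, size by size (the shape Port A uses inline)
def pvPowA (l : List Int) : List (List Int) :=
  (List.range (l.length + 1)).flatMap (fun r => PySem.List.combinations l r)

-- Python's sort key (len(s), s), as a lexicographic pair
def pvKey (s : List Int) : Lex (Int × List Int) := toLex ((s.length : Int), s)

-- low bits are unchanged by adding the top bit
lemma pvBit_lo (n m i : Nat) (hi : i < n) :
    (((2 ^ n + m) >>> i) &&& 1 == 1) = ((m >>> i) &&& 1 == 1) := by
  have hsplit : 2 ^ n = 2 ^ i * 2 ^ (n - i) := by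
    rw [← pow_add]; congr 1; omega
  have hd : (2 ^ n + m) / 2 ^ i = 2 ^ (n - i) + m / 2 ^ i := by
    rw [hsplit, Nat.mul_add_div (Nat.two_pow_pos i)]
  have he : 2 ^ (n - i) = 2 * 2 ^ (n - i - 1) := by
    rw [← pow_succ']; congr 1; omega
  simp only [Nat.shiftRight_eq_div_pow, Nat.and_one_is_mod, hd, he, Nat.mul_add_mod]

-- masks below 2^len(l) ignore the appended element
lemma pvMaskSubset_concat_lo (l : List Int) (x : Int) (m : Nat) (hm : m < 2 ^ l.length) :
    pvMaskSubset (l ++ [x]) m = pvMaskSubset l m := by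
  unfold pvMaskSubset
  have hlen : (l ++ [x]).length = l.length + 1 := by simp
  rw [hlen, List.range_succ, List.filter_append]
  have h2 : List.filter (fun i => (m >>> i) &&& 1 == 1) [l.length] = [] := by
    simp only [List.filter_cons, List.filter_nil]
    rw [Nat.shiftRight_eq_div_pow, Nat.div_eq_of_lt hm]
    simp
  rw [h2, List.append_nil]
  apply List.map_congr_left
  intro i hi
  have : i < l.length := List.mem_range.mp (List.mem_of_mem_filter hi)
  rw [List.getD_append _ _ _ _ this]

-- masks with the top bit set append x
lemma pvMaskSubset_concat_hi (l : List Int) (x : Int) (m : Nat) (hm : m < 2 ^ l.length) :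
    pvMaskSubset (l ++ [x]) (2 ^ l.length + m) = pvMaskSubset l m ++ [x] := by
  unfold pvMaskSubset
  have hlen : (l ++ [x]).length = l.length + 1 := by simp
  rw [hlen, List.range_succ, List.filter_append]
  have h2 : List.filter (fun i => ((2 ^ l.length + m) >>> i) &&& 1 == 1) [l.length]
      = [l.length] := by
    have h1 : (2 ^ l.length + m) / 2 ^ l.length = 1 := by
      apply Nat.div_eq_of_lt_le <;> omega
    simp only [List.filter_cons, List.filter_nil]
    rw [Nat.shiftRight_eq_div_pow, h1]
    simp
  rw [h2, List.map_append]
  congr 1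
  · have hfilt : (List.range l.length).filter (fun i => ((2 ^ l.length + m) >>> i) &&& 1 == 1)
        = (List.range l.length).filter (fun i => (m >>> i) &&& 1 == 1) := by
      apply List.filter_congr
      intro i hi
      exact pvBit_lo l.length m i (List.mem_range.mp hi)
    rw [hfilt]
    apply List.map_congr_left
    intro i hi
    have : i < l.length := List.mem_range.mp (List.mem_of_mem_filter hi)
    rw [List.getD_append _ _ _ _ this]
  · simp

-- the bitmask enumeration is exactly List.sublists
lemma pvMasks_eq_sublists (l : List Int) :
    (List.range (2 ^ l.length)).map (fun mask => pvMaskSubset l mask) = l.sublists := by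
  induction l using List.reverseRecOn with
  | nil => decide
  | append_singleton l x ih =>
    have hlen : (l ++ [x]).length = l.length + 1 := by simp
    rw [hlen, pow_succ, mul_two, List.range_add, List.map_append, List.map_map,
      List.sublists_concat, ← ih]
    congr 1
    · apply List.map_congr_left
      intro m hm
      exact pvMaskSubset_concat_lo l x m (List.mem_range.mp hm)
    · rw [List.map_map]
      apply List.map_congr_left
      intro m hm
      exact pvMaskSubset_concat_hi l x m (List.mem_range.mp hm)

lemma pvNodup_combinations (l : List Int) (r : Nat) (h : l.Nodup) :
    (PySem.List.combinations l r).Nodup := by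
  induction l generalizing r with
  | nil =>
    cases r with
    | zero => rw [PySem.List.combinations_zero]; simp
    | succ r => rw [PySem.List.combinations_nil_succ]; simp
  | cons x xs ih =>
    have hx : x ∉ xs := (List.nodup_cons.mp h).1
    have hxs : xs.Nodup := (List.nodup_cons.mp h).2
    cases r with
    | zero => rw [PySem.List.combinations_zero]; simp
    | succ r =>
      rw [PySem.List.combinations_cons_succ]
      apply List.Nodup.append
      · exact (ih r hxs).map (fun a b hab => by injection hab)
      · exact ih (r + 1) hxs
      · intro a ha hb
        rcases List.mem_map.mp ha with ⟨c, _, rfl⟩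
        have hsub := (PySem.List.mem_combinations_iff xs (r + 1) _ |>.mp hb).1
        exact hx (hsub.subset (by simp))

lemma pvMem_powA (l : List Int) (c : List Int) : c ∈ pvPowA l ↔ c.Sublist l := by
  simp only [pvPowA, List.mem_flatMap, List.mem_range, PySem.List.mem_combinations_iff]
  constructor
  · rintro ⟨r, _, hc, _⟩; exact hc
  · intro hc
    exact ⟨c.length, by have := hc.length_le; omega, hc, rfl⟩

lemma pvNodup_powA (l : List Int) (h : l.Nodup) : (pvPowA l).Nodup := by
  rw [pvPowA, List.nodup_flatMap]
  refine ⟨fun r _ => pvNodup_combinations l r h, ?_⟩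
  apply List.pairwise_lt_range.imp
  intro r1 r2 hlt c hc1 hc2
  have h1 := (PySem.List.mem_combinations_iff l r1 c).mp hc1 |>.2
  have h2 := (PySem.List.mem_combinations_iff l r2 c).mp hc2 |>.2
  omega

lemma pvPowA_perm_sublists (l : List Int) (h : l.Nodup) : (pvPowA l).Perm l.sublists := by
  rw [List.perm_ext_iff_of_nodup (pvNodup_powA l h) (List.nodup_sublists.mpr h)]
  intro c
  rw [pvMem_powA, List.mem_sublists]

-- combinations of a strictly increasing list are strictly lex-increasing
lemma pvCombinations_pairwise_lt (l : List Int) (h : l.Pairwise (· < ·)) (r : Nat) :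
    (PySem.List.combinations l r).Pairwise (· < ·) := by
  induction l generalizing r with
  | nil =>
    cases r with
    | zero => rw [PySem.List.combinations_zero]; simp
    | succ r => rw [PySem.List.combinations_nil_succ]; simp
  | cons x xs ih =>
    have hx : ∀ y ∈ xs, x < y := fun y hy => List.rel_of_pairwise_cons h hy
    have hxs : xs.Pairwise (· < ·) := (List.pairwise_cons.mp h).2
    cases r with
    | zero => rw [PySem.List.combinations_zero]; simp
    | succ r =>
      rw [PySem.List.combinations_cons_succ]
      rw [List.pairwise_append]
      refine ⟨?_, ih hxs (r + 1), ?_⟩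
      · rw [List.pairwise_map]
        exact (ih hxs r).imp (fun hab => by
          rw [List.cons_lt_cons_iff]; exact Or.inr ⟨rfl, hab⟩)
      · intro a ha b hb
        rcases List.mem_map.mp ha with ⟨c, _, rfl⟩
        have hmem := (PySem.List.mem_combinations_iff xs (r + 1) b).mp hb
        cases b with
        | nil => simp at hmem
        | cons y b' =>
          have hy : y ∈ xs := hmem.1.subset (by simp)
          rw [List.cons_lt_cons_iff]
          exact Or.inl (hx y hy)

-- A's power set is strictly increasing under the (len, lex) sort key
lemma pvPowA_pairwise_key (l : List Int) (h : l.Pairwise (· < ·)) :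
    (pvPowA l).Pairwise (fun a b => pvKey a < pvKey b) := by
  rw [pvPowA, List.pairwise_flatMap]
  constructor
  · intro r _
    refine (pvCombinations_pairwise_lt l h r).imp_of_mem ?_
    intro a b ha hb hab
    have h1 := (PySem.List.mem_combinations_iff l r a).mp ha |>.2
    have h2 := (PySem.List.mem_combinations_iff l r b).mp hb |>.2
    rw [pvKey, pvKey, Prod.Lex.toLex_lt_toLex]
    exact Or.inr ⟨by rw [h1, h2], hab⟩
  · apply List.pairwise_lt_range.imp
    intro r1 r2 hlt a ha b hb
    have h1 := (PySem.List.mem_combinations_iff l r1 a).mp ha |>.2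
    have h2 := (PySem.List.mem_combinations_iff l r2 b).mp hb |>.2
    rw [pvKey, pvKey, Prod.Lex.toLex_lt_toLex]
    exact Or.inl (by simp only [h1, h2]; exact_mod_cast hlt)

-- sorted2 with key components (len, id) is sorted with the lexicographic pair key
lemma pvSorted2_eq_sorted_key (xs : List (List Int)) :
    PySem.List.sorted2 xs (fun s => (s.length : Int)) (fun s => s) false =
      PySem.List.sorted xs pvKey false := by
  simp only [PySem.List.sorted2, PySem.List.sorted, if_neg (by decide : ¬(false = true))]
  have h : (fun (a b : List Int) => decide ((a.length : Int) < (b.length : Int)) ||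
      (!decide ((b.length : Int) < (a.length : Int)) && decide (a < b)))
      = fun a b => decide (pvKey a < pvKey b) := by
    funext a b
    rcases lt_trichotomy ((a.length : Int)) ((b.length : Int)) with h | h | h
    · simp [pvKey, Prod.Lex.toLex_lt_toLex, h]
    · simp [pvKey, Prod.Lex.toLex_lt_toLex, h]
    · simp [pvKey, Prod.Lex.toLex_lt_toLex, h, lt_asymm h, h.ne']
  rw [h]

lemma pvPowerSet_eq (l : List Int) (h : l.Pairwise (· < ·)) : pvPowerSet l = pvPowA l := by
  unfold pvPowerSet
  rw [pvSorted2_eq_sorted_key, pvMasks_eq_sublists]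
  exact PySem.List.sorted_eq_of_perm_of_pairwise_lt _ _ pvKey
    (pvPowA_perm_sublists l h.nodup) (pvPowA_pairwise_key l h)

-- ===== VERDICT (by name: the statement is the Claim_ definition above) =====
theorem generate_doublet_mi_tasks_spec : Claim_equal_generate_doublet_mi_tasks := by
  intro ns nt _
  unfold Spec_generate_doublet_mi_tasks
  unfold generate_doublet_mi_tasks generate_doublet_mi_tasks_alt
  have hfold : ∀ (S T : List (List Int)),
      S.foldl (fun tasks s => T.foldl (fun tasks t => tasks ++ [(s, t)]) tasks) [] =
        S.flatMap (fun s => T.map (fun t => (s, t))) := by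
    intro S T
    have h1 : (fun (tasks : List (List Int × List Int)) s =>
        T.foldl (fun tasks t => tasks ++ [(s, t)]) tasks)
        = fun tasks s => tasks ++ T.map (fun t => (s, t)) := by
      funext tasks s
      exact PySem.List.foldl_append_singleton_eq_map (fun t => (s, t)) T tasks
    rw [h1]
    simpa using PySem.List.foldl_append_eq_flatMap (fun s => T.map (fun t => (s, t))) S []
  rw [hfold]
  rw [pvPowerSet_eq _ (PySem.List.pairwise_lt_pyRange_one ..),
      pvPowerSet_eq _ (PySem.List.pairwise_lt_pyRange_one ..)]
  rfl
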